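-- pv_equiv track=rewrite | github.com/lmgame-org/GamingAgent | games/tetris/workers.py | generate_rotations
-- ===== SOURCE A (Python) =====
-- pivot_map = {
--     "O": (0, 0),
--     "I": (0, 1),   # For a 1x4 representation, choose the second cell.
--     "S": (1, 1),
--     "Z": (1, 1),
--     "T": (0, 1),   # For our canonical 2x3 T shape: top row is [1,1,1] and bottom row is [0,1,0].
--     "J": (1, 1),
--     "L": (1, 1)
-- }
--
-- def rotate_shape_about_pivot(matrix, pivot):
--     """
--     Rotate the shape (matrix) 90° clockwise about the given pivot.
--     The pivot is given as a coordinate (row, col) relative to the matrix.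
--     Returns a tuple: (new_matrix, new_pivot) where new_matrix is the rotated shape
--     in a minimal bounding box and new_pivot is the pivot's coordinate in that new matrix.
--     """
--     coords = []
--     for i, row in enumerate(matrix):
--         for j, cell in enumerate(row):
--             if cell:
--                 coords.append((i, j))
--     new_coords = []
--     pr, pc = pivot
--     for (i, j) in coords:
--         # Compute offset from pivot.
--         off_i = i - pr
--         off_j = j - pc
--         # Rotate offset: (off_i, off_j) -> (off_j, -off_i)
--         new_i = pr + off_j
--         new_j = pc - off_i
--         new_coords.append((new_i, new_j))
--     # Re-normalize: shift so that the minimal coordinate becomes (0,0).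
--     min_i = min(i for i, j in new_coords)
--     min_j = min(j for i, j in new_coords)
--     normalized = {(i - min_i, j - min_j) for (i, j) in new_coords}
--     # The new pivot in the normalized coordinates.
--     new_pivot = (pivot[0] - min_i, pivot[1] - min_j)
--     # Build the new matrix.
--     max_i = max(i for i, j in normalized)
--     max_j = max(j for i, j in normalized)
--     new_matrix = [[0]*(max_j+1) for _ in range(max_i+1)]
--     for (i, j) in normalized:
--         new_matrix[i][j] = 1
--     return new_matrix, new_pivot
--
-- def generate_rotations(shape):
--     """
--     Return a list of rotation states for the given tetromino shape.
--     Each state is a tuple: (matrix, pivot), where matrix is a 2D list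
--     representing the shape (with 1's for blocks) and pivot is the center coordinate
--     that should remain fixed.
--     Number of states:
--       O: 1, I/S/Z: 2, T/J/L: 4.
--     """
--     shapes = {
--         "O": [[1, 1],
--               [1, 1]],
--         "I": [[1, 1, 1, 1]],
--         "S": [[0, 1, 1],
--               [1, 1, 0]],
--         "Z": [[1, 1, 0],
--               [0, 1, 1]],
--         "T": [[1, 1, 1],
--               [0, 1, 0]],
--         "J": [[1, 0, 0],
--               [1, 1, 1]],
--         "L": [[0, 0, 1],
--               [1, 1, 1]],
--     }
--     base = shapes.get(shape)
--     if base is None: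
--         return []
--     pivot = pivot_map.get(shape, (0,0))
--
--     rotations = []
--     if shape == "O":
--         rotations.append((base, pivot))
--     elif shape in ["I", "S", "Z"]:
--         # Two states: base and one rotation.
--         rotations.append((base, pivot))
--         rot_matrix, rot_pivot = rotate_shape_about_pivot(base, pivot)
--         rotations.append((rot_matrix, rot_pivot))
--     elif shape in ["T", "J", "L"]:
--         # Four rotations.
--         current_matrix = base
--         current_pivot = pivot
--         for _ in range(4):
--             rotations.append((current_matrix, current_pivot))
--             current_matrix, current_pivot = rotate_shape_about_pivot(current_matrix, current_pivot)
--     else: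
--         rotations.append((base, pivot))
--     return rotations
-- ===== SOURCE B (Python) =====
-- _ROTATION_TABLE = {
--     "O": [([[1, 1], [1, 1]], (0, 0))],
--     "I": [([[1, 1, 1, 1]], (0, 1)), ([[1], [1], [1], [1]], (1, 0))],
--     "S": [([[0, 1, 1], [1, 1, 0]], (1, 1)), ([[1, 0], [1, 1], [0, 1]], (1, 0))],
--     "Z": [([[1, 1, 0], [0, 1, 1]], (1, 1)), ([[0, 1], [1, 1], [1, 0]], (1, 0))],
--     "T": [([[1, 1, 1], [0, 1, 0]], (0, 1)), ([[0, 1], [1, 1], [0, 1]], (1, 1)),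
--           ([[0, 1, 0], [1, 1, 1]], (1, 1)), ([[1, 0], [1, 1], [1, 0]], (1, 0))],
--     "J": [([[1, 0, 0], [1, 1, 1]], (1, 1)), ([[1, 1], [1, 0], [1, 0]], (1, 0)),
--           ([[1, 1, 1], [0, 0, 1]], (0, 1)), ([[0, 1], [0, 1], [1, 1]], (1, 1))],
--     "L": [([[0, 0, 1], [1, 1, 1]], (1, 1)), ([[1, 0], [1, 0], [1, 1]], (1, 0)),
--           ([[1, 1, 1], [1, 0, 0]], (0, 1)), ([[1, 1], [0, 1], [0, 1]], (1, 1))],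
-- }
--
-- def generate_rotations(shape):
--     states = _ROTATION_TABLE.get(shape)
--     if states is None:
--         return []
--     return [([row[:] for row in m], p) for (m, p) in states]
-- ===== Notes on version B (the rewrite author's own statement) =====
-- stated objective: simpler
-- what changed: B replaces the per-rotation geometric computation (coordinate extraction, rotation about a pivot, renormalization, matrix rebuild) with a single precomputed table mapping each shape letter to its full list of (matrix, pivot) rotation states, returned by one lookup (fresh copies) with [] for unknown shapes.
import Mathlib
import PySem

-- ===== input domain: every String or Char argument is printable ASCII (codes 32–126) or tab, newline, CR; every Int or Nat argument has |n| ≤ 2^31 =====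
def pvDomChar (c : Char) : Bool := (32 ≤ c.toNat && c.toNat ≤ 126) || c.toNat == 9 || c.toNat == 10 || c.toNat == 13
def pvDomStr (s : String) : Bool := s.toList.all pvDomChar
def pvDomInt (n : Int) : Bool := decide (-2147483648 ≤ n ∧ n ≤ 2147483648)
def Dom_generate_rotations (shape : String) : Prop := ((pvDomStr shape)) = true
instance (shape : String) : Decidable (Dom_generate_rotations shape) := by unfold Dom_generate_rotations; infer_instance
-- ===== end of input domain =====

-- B replaces A's per-rotation geometric computation with a single precomputed table lookup (objective: simpler); return values are proved equal for every shape string.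

-- ===== PORT A =====
-- Faithful port of A's rotate_shape_about_pivot. Python's min()/max() over the
-- (always nonempty here) coordinate lists is ported as head+foldl; the empty case
-- (Python would raise ValueError) is unreachable from generate_rotations.
def pvMinInt (xs : List Int) : Int :=
  match xs with
  | [] => 0
  | h :: t => t.foldl min h

def pvMaxInt (xs : List Int) : Int :=
  match xs with
  | [] => 0
  | h :: t => t.foldl max h

def rotate_shape_about_pivot (matrix : List (List Int)) (pivot : Int × Int) :
    List (List Int) × (Int × Int) :=
  let coords : List (Int × Int) :=
    (PySem.List.enumerate matrix).foldl (fun acc ir =>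
      (PySem.List.enumerate ir.2).foldl (fun a jc =>
        if jc.2 ≠ 0 then a ++ [(ir.1, jc.1)] else a) acc) []
  let pr := pivot.1
  let pc := pivot.2
  let new_coords : List (Int × Int) :=
    coords.foldl (fun a ij => a ++ [(pr + (ij.2 - pc), pc - (ij.1 - pr))]) []
  let min_i := pvMinInt (new_coords.map Prod.fst)
  let min_j := pvMinInt (new_coords.map Prod.snd)
  let normalized : PySem.Set (Int × Int) :=
    PySem.Set.ofList (new_coords.map (fun ij => (ij.1 - min_i, ij.2 - min_j)))
  let new_pivot := (pivot.1 - min_i, pivot.2 - min_j)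
  let max_i := pvMaxInt (normalized.map Prod.fst)
  let max_j := pvMaxInt (normalized.map Prod.snd)
  let new_matrix0 : List (List Int) :=
    (PySem.List.pyRange 0 (max_i + 1) 1).map (fun _ =>
      (PySem.List.pyRange 0 (max_j + 1) 1).map (fun _ => (0 : Int)))
  let new_matrix :=
    normalized.foldl (fun m ij =>
      PySem.List.pySetD m ij.1 (PySem.List.pySetD (PySem.List.pyGetD m ij.1 []) ij.2 1)) new_matrix0
  (new_matrix, new_pivot)

def generate_rotations (shape : String) : List (List (List Int) × (Int × Int)) :=
  let shapes : PySem.Dict String (List (List Int)) :=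
    PySem.Dict.ofList [
      ("O", [[1, 1], [1, 1]]),
      ("I", [[1, 1, 1, 1]]),
      ("S", [[0, 1, 1], [1, 1, 0]]),
      ("Z", [[1, 1, 0], [0, 1, 1]]),
      ("T", [[1, 1, 1], [0, 1, 0]]),
      ("J", [[1, 0, 0], [1, 1, 1]]),
      ("L", [[0, 0, 1], [1, 1, 1]])]
  match shapes.get? shape with
  | none => []
  | some base =>
    let pivot_map : PySem.Dict String (Int × Int) :=
      PySem.Dict.ofList [
        ("O", (0, 0)), ("I", (0, 1)), ("S", (1, 1)), ("Z", (1, 1)),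
        ("T", (0, 1)), ("J", (1, 1)), ("L", (1, 1))]
    let pivot := pivot_map.getD shape (0, 0)
    if shape == "O" then
      [(base, pivot)]
    else if shape == "I" ∨ shape == "S" ∨ shape == "Z" then
      let r := rotate_shape_about_pivot base pivot
      [(base, pivot), (r.1, r.2)]
    else if shape == "T" ∨ shape == "J" ∨ shape == "L" then
      ((List.range 4).foldl (fun st _ =>
        let r := rotate_shape_about_pivot st.2.1 st.2.2
        (st.1 ++ [(st.2.1, st.2.2)], r.1, r.2)) ([], base, pivot)).1
    else
      [(base, pivot)]


-- ===== PORT B =====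
-- B: one precomputed table, one lookup (with fresh row copies), [] for unknown shapes.
def pvRotationTable : PySem.Dict String (List (List (List Int) × (Int × Int))) :=
  PySem.Dict.ofList [
    ("O", [([[1, 1], [1, 1]], (0, 0))]),
    ("I", [([[1, 1, 1, 1]], (0, 1)), ([[1], [1], [1], [1]], (1, 0))]),
    ("S", [([[0, 1, 1], [1, 1, 0]], (1, 1)), ([[1, 0], [1, 1], [0, 1]], (1, 0))]),
    ("Z", [([[1, 1, 0], [0, 1, 1]], (1, 1)), ([[0, 1], [1, 1], [1, 0]], (1, 0))]),
    ("T", [([[1, 1, 1], [0, 1, 0]], (0, 1)), ([[0, 1], [1, 1], [0, 1]], (1, 1)),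
           ([[0, 1, 0], [1, 1, 1]], (1, 1)), ([[1, 0], [1, 1], [1, 0]], (1, 0))]),
    ("J", [([[1, 0, 0], [1, 1, 1]], (1, 1)), ([[1, 1], [1, 0], [1, 0]], (1, 0)),
           ([[1, 1, 1], [0, 0, 1]], (0, 1)), ([[0, 1], [0, 1], [1, 1]], (1, 1))]),
    ("L", [([[0, 0, 1], [1, 1, 1]], (1, 1)), ([[1, 0], [1, 0], [1, 1]], (1, 0)),
           ([[1, 1, 1], [1, 0, 0]], (0, 1)), ([[1, 1], [0, 1], [0, 1]], (1, 1))])]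

def generate_rotations_alt (shape : String) : List (List (List Int) × (Int × Int)) :=
  match pvRotationTable.get? shape with
  | none => []
  | some states => states.map (fun mp => (mp.1.map (fun row => row), mp.2))


-- ===== PRECONDITION & SPEC =====
def Spec_generate_rotations (shape : String) (out : List (List (List Int) × (Int × Int))) : Prop := out = generate_rotations_alt shape
instance (shape : String) (out : List (List (List Int) × (Int × Int))) : Decidable (Spec_generate_rotations shape out) := by unfold Spec_generate_rotations; infer_instance


-- ===== CLAIM (what is proved, stated in full; the proofs are below) =====
def Claim_equal_generate_rotations : Prop := ∀ (shape : String), Dom_generate_rotations shape → Spec_generate_rotations shape (generate_rotations shape)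


-- ===== LEMMAS AND PROOFS =====


-- ===== VERDICT (by name: the statement is the Claim_ definition above) =====
theorem generate_rotations_spec : Claim_equal_generate_rotations := by
  intro shape _
  unfold Spec_generate_rotations
  by_cases hO : shape = "O"; · subst hO; decide
  by_cases hI : shape = "I"; · subst hI; decide
  by_cases hS : shape = "S"; · subst hS; decide
  by_cases hZ : shape = "Z"; · subst hZ; decide
  by_cases hT : shape = "T"; · subst hT; decide
  by_cases hJ : shape = "J"; · subst hJ; decide
  by_cases hL : shape = "L"; · subst hL; decide
  simp [generate_rotations, generate_rotations_alt, pvRotationTable,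
    PySem.Dict.ofList, PySem.Dict.update, PySem.Dict.get?_insert, PySem.Dict.get?_empty,
    hO, hI, hS, hZ, hT, hJ, hL]
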